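-- pv_equiv track=rewrite | github.com/MrBrantCode/unitest_baseline | mut_generate/mist_train_taco/taco_18762/solution.py | count_non_intersecting_segments
-- ===== SOURCE A (Python) =====
-- def count_non_intersecting_segments(test_cases):
--     results = []
--
--     for case in test_cases:
--         N = case[0]
--         A = case[1]
--
--         if len(set(A)) == N:
--             # If all elements are unique, use the formula for unique elements
--             n = N + 2
--             result = n * (n - 1) * (n - 2) * (n - 3) // 24
--             results.append(result)
--             continue
--
--         counter = 0
--         for i in range(N - 1):
--             dic = {}
--             for j in range(i, N - 1):
--                 if A[j] in dic:
--                     dic[A[j]] += 1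
--                 else:
--                     dic[A[j]] = 1
--                 for p in range(j + 1, N):
--                     if A[p] in dic:
--                         continue
--                     for q in range(p, N):
--                         if A[q] in dic:
--                             break
--                         counter += 1
--
--         results.append(counter)
--
--     return results
-- ===== SOURCE B (Python) =====
-- def count_non_intersecting_segments(test_cases):
--     # Same outer structure, but the O(N^2) p/q scan per (i, j) is replaced by a
--     # single O(N) pass counting run lengths of positions not yet seen.
--     results = []
--     for case in test_cases:
--         N = case[0]
--         A = case[1]
--
--         if len(set(A)) == N:
--             n = N + 2
--             results.append(n * (n - 1) * (n - 2) * (n - 3) // 24)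
--             continue
--
--         counter = 0
--         for i in range(N - 1):
--             seen = set()
--             for j in range(i, N - 1):
--                 seen.add(A[j])
--                 run = 0
--                 for t in range(j + 1, N):
--                     if A[t] in seen:
--                         run = 0
--                     else:
--                         run += 1
--                         counter += run
--         results.append(counter)
--     return results
-- ===== Notes on version B (the rewrite author's own statement) =====
-- stated objective: faster
-- what changed: The inner p/q double scan that enumerates every valid (p,q) pair one by one is replaced by a single left-to-right pass over range(j+1,N) that maintains the current run length of not-yet-seen positions and adds it to the counter, so each (i,j) step costs O(N) instead of O(N^2); the multiset dict is also replaced by a plain set since only membership is used.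
import Mathlib
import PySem

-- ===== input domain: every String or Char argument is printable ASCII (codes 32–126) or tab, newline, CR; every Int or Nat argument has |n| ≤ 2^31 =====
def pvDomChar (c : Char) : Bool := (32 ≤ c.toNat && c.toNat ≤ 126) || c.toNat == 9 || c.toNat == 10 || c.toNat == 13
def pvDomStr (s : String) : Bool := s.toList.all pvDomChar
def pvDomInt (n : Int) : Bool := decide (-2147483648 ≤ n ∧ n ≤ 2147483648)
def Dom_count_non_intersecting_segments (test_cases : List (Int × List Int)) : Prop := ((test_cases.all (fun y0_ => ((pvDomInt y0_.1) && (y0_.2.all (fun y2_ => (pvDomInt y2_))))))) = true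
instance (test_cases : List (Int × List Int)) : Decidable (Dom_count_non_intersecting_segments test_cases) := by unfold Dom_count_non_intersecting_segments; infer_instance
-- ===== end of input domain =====

-- B replaces A's O(N^2)-per-(i,j) p/q double scan by a single O(N) run-length pass (faster).

-- ===== PORT A =====
-- 'for q in range(p, N): if A[q] in dic: break; counter += 1'
def pvAQLoop (A : List Int) (dic : PySem.Dict Int Int) : List Int → Int → Int
  | [], c => c
  | q :: rest, c =>
    if dic.contains (PySem.List.pyGetD A q 0) then c else pvAQLoop A dic rest (c + 1)

-- 'for p in range(j+1, N): if A[p] in dic: continue; <q loop over range(p, N)>'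
-- the argument list is pyRange (j+1) N 1, so at element p the q-range range(p, N) is exactly p :: rest
def pvAPLoop (A : List Int) (dic : PySem.Dict Int Int) : List Int → Int → Int
  | [], c => c
  | p :: rest, c =>
    if dic.contains (PySem.List.pyGetD A p 0) then pvAPLoop A dic rest c
    else pvAPLoop A dic rest (pvAQLoop A dic (p :: rest) c)

-- one test case: N = case[0], A = case[1]
def pvACase (N : Int) (A : List Int) : Int :=
  if PySem.Set.len (PySem.Set.ofList A) = N then
    (N + 2) * (N + 2 - 1) * (N + 2 - 2) * (N + 2 - 3) |> (PySem.Int.floordiv · 24)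
  else
    (PySem.List.pyRange 0 (N - 1) 1).foldl (fun counter i =>
      ((PySem.List.pyRange i (N - 1) 1).foldl (fun (st : PySem.Dict Int Int × Int) j =>
          (if st.1.contains (PySem.List.pyGetD A j 0)
             then st.1.modify (PySem.List.pyGetD A j 0) 0 (· + 1)
             else st.1.insert (PySem.List.pyGetD A j 0) 1,
           pvAPLoop A
             (if st.1.contains (PySem.List.pyGetD A j 0)
                then st.1.modify (PySem.List.pyGetD A j 0) 0 (· + 1)
                else st.1.insert (PySem.List.pyGetD A j 0) 1)
             (PySem.List.pyRange (j + 1) N 1) st.2))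
        (PySem.Dict.empty, counter)).2) 0

def count_non_intersecting_segments (test_cases : List (Int × List Int)) : List Int :=
  test_cases.foldl (fun results case => results ++ [pvACase case.1 case.2]) []

-- ===== PORT B =====
def pvBCase (N : Int) (A : List Int) : Int :=
  if PySem.Set.len (PySem.Set.ofList A) = N then
    (N + 2) * (N + 2 - 1) * (N + 2 - 2) * (N + 2 - 3) |> (PySem.Int.floordiv · 24)
  else
    (PySem.List.pyRange 0 (N - 1) 1).foldl (fun counter i =>
      ((PySem.List.pyRange i (N - 1) 1).foldl (fun (st : PySem.Set Int × Int) j =>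
          (PySem.Set.add st.1 (PySem.List.pyGetD A j 0),
           ((PySem.List.pyRange (j + 1) N 1).foldl (fun (rc : Int × Int) t =>
               if PySem.Set.contains (PySem.Set.add st.1 (PySem.List.pyGetD A j 0))
                    (PySem.List.pyGetD A t 0)
                 then (0, rc.2)
                 else (rc.1 + 1, rc.2 + (rc.1 + 1))) (0, st.2)).2))
        (PySem.Set.empty, counter)).2) 0

def count_non_intersecting_segments_alt (test_cases : List (Int × List Int)) : List Int :=
  test_cases.foldl (fun results case => results ++ [pvBCase case.1 case.2]) []

-- ===== PRECONDITION & SPEC =====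
-- Pre_ excludes exactly the inputs where the Python raises IndexError: a case with
-- N > len(A) whose loops touch an index (N ≥ 2; for N ≤ 1 no element is ever indexed).
def Pre_count_non_intersecting_segments (test_cases : List (Int × List Int)) : Prop :=
  ∀ case ∈ test_cases, case.1 ≤ (case.2.length : Int) ∨ case.1 ≤ 1
instance (test_cases : List (Int × List Int)) : Decidable (Pre_count_non_intersecting_segments test_cases) := by unfold Pre_count_non_intersecting_segments; infer_instance

def pvWitness_count_non_intersecting_segments : (List (Int × List Int)) := [(4, [1, 2, 1, 2]), (2, [5, 5])]

def Spec_count_non_intersecting_segments (test_cases : List (Int × List Int)) (out : List Int) : Prop := out = count_non_intersecting_segments_alt test_cases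
instance (test_cases : List (Int × List Int)) (out : List Int) : Decidable (Spec_count_non_intersecting_segments test_cases out) := by unfold Spec_count_non_intersecting_segments; infer_instance

-- ===== CLAIM (what is proved, stated in full; the proofs are below) =====
def Claim_equal_count_non_intersecting_segments : Prop := ∀ (test_cases : List (Int × List Int)), Dom_count_non_intersecting_segments test_cases → Pre_count_non_intersecting_segments test_cases → Spec_count_non_intersecting_segments test_cases (count_non_intersecting_segments test_cases)

-- ===== LEMMAS AND PROOFS =====

-- length of the leading stretch of positions whose value is NOT in dic
def pvPT (A : List Int) (dic : PySem.Dict Int Int) : List Int → Int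
  | [] => 0
  | t :: rest => if dic.contains (PySem.List.pyGetD A t 0) then 0 else 1 + pvPT A dic rest

theorem pvAQLoop_eq (A : List Int) (dic : PySem.Dict Int Int) :
    ∀ (ts : List Int) (c : Int), pvAQLoop A dic ts c = c + pvPT A dic ts := by
  intro ts
  induction ts with
  | nil => intro c; simp [pvAQLoop, pvPT]
  | cons t rest ih =>
    intro c
    by_cases h : dic.contains (PySem.List.pyGetD A t 0)
    · simp [pvAQLoop, pvPT, h]
    · simp [pvAQLoop, pvPT, h, ih]; ring

theorem pvAPLoop_shift (A : List Int) (dic : PySem.Dict Int Int) :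
    ∀ (ts : List Int) (c d : Int), pvAPLoop A dic ts (c + d) = pvAPLoop A dic ts c + d := by
  intro ts
  induction ts with
  | nil => intro c d; simp [pvAPLoop]
  | cons t rest ih =>
    intro c d
    by_cases h : dic.contains (PySem.List.pyGetD A t 0)
    · simp [pvAPLoop, h, ih]
    · simp only [pvAPLoop, h, if_false, Bool.false_eq_true]
      rw [pvAQLoop_eq, pvAQLoop_eq]
      have heq : c + d + pvPT A dic (t :: rest) = (c + pvPT A dic (t :: rest)) + d := by ring
      rw [heq, ih]

-- B's run-length pass equals A's p/q double scan
theorem pvRun_eq (A : List Int) (dic : PySem.Dict Int Int) :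
    ∀ (ts : List Int) (r c : Int),
      (ts.foldl (fun (rc : Int × Int) t =>
          if dic.contains (PySem.List.pyGetD A t 0) then (0, rc.2)
          else (rc.1 + 1, rc.2 + (rc.1 + 1))) (r, c)).2
        = pvAPLoop A dic ts c + r * pvPT A dic ts := by
  intro ts
  induction ts with
  | nil => intro r c; simp [pvAPLoop, pvPT]
  | cons t rest ih =>
    intro r c
    by_cases h : dic.contains (PySem.List.pyGetD A t 0)
    · simp only [List.foldl_cons, h, if_true, pvAPLoop, pvPT]
      rw [ih]
      simp
    · simp only [List.foldl_cons, h, if_false, Bool.false_eq_true, pvAPLoop, pvPT]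
      rw [ih, pvAQLoop_eq]
      have hpt : pvPT A dic (t :: rest) = 1 + pvPT A dic rest := by
        simp [pvPT, h]
      rw [hpt, pvAPLoop_shift, pvAPLoop_shift]
      ring

-- dict-membership / set-membership invariant through one update step
theorem pvStep_contains (a : Int) (dic : PySem.Dict Int Int) (seen : PySem.Set Int)
    (h : ∀ x, dic.contains x = PySem.Set.contains seen x) :
    ∀ x, ((if dic.contains a then dic.modify a 0 (· + 1) else dic.insert a 1).contains x)
        = PySem.Set.contains (PySem.Set.add seen a) x := by
  intro x
  by_cases ha : dic.contains a
  · have hmem : a ∈ seen := by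
      rw [← PySem.Set.contains_iff, ← h a]; exact ha
    rw [PySem.Set.add_of_mem hmem]
    simp only [ha, if_true, PySem.Dict.contains_modify]
    rw [h x]
    by_cases hx : x = a
    · subst hx; simp [hmem]
    · simp [hx]
  · have hnmem : a ∉ seen := by
      intro hm
      rw [← PySem.Set.contains_iff, ← h a] at hm
      exact ha hm
    rw [PySem.Set.add_of_not_mem hnmem]
    simp only [ha, if_false, Bool.false_eq_true, PySem.Dict.contains_insert]
    by_cases hx : x = a
    · subst hx
      simp [PySem.Set.contains_eq_listContains]
    · have hxa : (x == a) = false := by simp [hx]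
      simp only [hxa, Bool.false_or, h x, PySem.Set.contains_eq_listContains]
      simp [hx]

-- the j-loops agree given the membership invariant
theorem pvJLoop_eq (A : List Int) (N : Int) :
    ∀ (js : List Int) (dic : PySem.Dict Int Int) (seen : PySem.Set Int) (c : Int),
      (∀ x, dic.contains x = PySem.Set.contains seen x) →
      (js.foldl (fun (st : PySem.Dict Int Int × Int) j =>
          (if st.1.contains (PySem.List.pyGetD A j 0)
             then st.1.modify (PySem.List.pyGetD A j 0) 0 (· + 1)
             else st.1.insert (PySem.List.pyGetD A j 0) 1,
           pvAPLoop A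
             (if st.1.contains (PySem.List.pyGetD A j 0)
                then st.1.modify (PySem.List.pyGetD A j 0) 0 (· + 1)
                else st.1.insert (PySem.List.pyGetD A j 0) 1)
             (PySem.List.pyRange (j + 1) N 1) st.2)) (dic, c)).2
      = (js.foldl (fun (st : PySem.Set Int × Int) j =>
          (PySem.Set.add st.1 (PySem.List.pyGetD A j 0),
           ((PySem.List.pyRange (j + 1) N 1).foldl (fun (rc : Int × Int) t =>
               if PySem.Set.contains (PySem.Set.add st.1 (PySem.List.pyGetD A j 0))
                    (PySem.List.pyGetD A t 0)
                 then (0, rc.2)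
                 else (rc.1 + 1, rc.2 + (rc.1 + 1))) (0, st.2)).2)) (seen, c)).2 := by
  intro js
  induction js with
  | nil => intro dic seen c h; rfl
  | cons j rest ih =>
    intro dic seen c h
    simp only [List.foldl_cons]
    have hinv := pvStep_contains (PySem.List.pyGetD A j 0) dic seen h
    have hf : (fun (rc : Int × Int) t =>
          if PySem.Set.contains (PySem.Set.add seen (PySem.List.pyGetD A j 0))
               (PySem.List.pyGetD A t 0)
            then (0, rc.2)
            else (rc.1 + 1, rc.2 + (rc.1 + 1)))
        = (fun (rc : Int × Int) t =>
          if (if dic.contains (PySem.List.pyGetD A j 0)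
                then dic.modify (PySem.List.pyGetD A j 0) 0 (· + 1)
                else dic.insert (PySem.List.pyGetD A j 0) 1).contains (PySem.List.pyGetD A t 0)
            then (0, rc.2)
            else (rc.1 + 1, rc.2 + (rc.1 + 1))) := by
      funext rc t
      rw [hinv]
    have hcnt : ((PySem.List.pyRange (j + 1) N 1).foldl (fun (rc : Int × Int) t =>
          if PySem.Set.contains (PySem.Set.add seen (PySem.List.pyGetD A j 0))
               (PySem.List.pyGetD A t 0)
            then (0, rc.2)
            else (rc.1 + 1, rc.2 + (rc.1 + 1))) (0, c)).2
        = pvAPLoop A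
            (if dic.contains (PySem.List.pyGetD A j 0)
               then dic.modify (PySem.List.pyGetD A j 0) 0 (· + 1)
               else dic.insert (PySem.List.pyGetD A j 0) 1)
            (PySem.List.pyRange (j + 1) N 1) c := by
      rw [hf, pvRun_eq]
      ring
    rw [hcnt]
    exact ih _ _ _ hinv

theorem pvCase_eq (N : Int) (A : List Int) : pvACase N A = pvBCase N A := by
  unfold pvACase pvBCase
  split_ifs with hu
  · rfl
  · have hstep : (fun (counter : Int) (i : Int) =>
        ((PySem.List.pyRange i (N - 1) 1).foldl (fun (st : PySem.Dict Int Int × Int) j =>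
            (if st.1.contains (PySem.List.pyGetD A j 0)
               then st.1.modify (PySem.List.pyGetD A j 0) 0 (· + 1)
               else st.1.insert (PySem.List.pyGetD A j 0) 1,
             pvAPLoop A
               (if st.1.contains (PySem.List.pyGetD A j 0)
                  then st.1.modify (PySem.List.pyGetD A j 0) 0 (· + 1)
                  else st.1.insert (PySem.List.pyGetD A j 0) 1)
               (PySem.List.pyRange (j + 1) N 1) st.2))
          (PySem.Dict.empty, counter)).2)
      = (fun (counter : Int) (i : Int) =>
        ((PySem.List.pyRange i (N - 1) 1).foldl (fun (st : PySem.Set Int × Int) j =>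
            (PySem.Set.add st.1 (PySem.List.pyGetD A j 0),
             ((PySem.List.pyRange (j + 1) N 1).foldl (fun (rc : Int × Int) t =>
                 if PySem.Set.contains (PySem.Set.add st.1 (PySem.List.pyGetD A j 0))
                      (PySem.List.pyGetD A t 0)
                   then (0, rc.2)
                   else (rc.1 + 1, rc.2 + (rc.1 + 1))) (0, st.2)).2))
          (PySem.Set.empty, counter)).2) := by
      funext counter i
      apply pvJLoop_eq
      intro x
      simp [PySem.Set.empty, PySem.Set.contains_eq_listContains]
    rw [hstep]

-- ===== VERDICT (by name: the statement is the Claim_ definition above) =====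
theorem count_non_intersecting_segments_spec : Claim_equal_count_non_intersecting_segments := by
  intro test_cases _ _
  unfold Spec_count_non_intersecting_segments
  unfold count_non_intersecting_segments count_non_intersecting_segments_alt
  simp only [pvCase_eq]
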